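-- pv_equiv track=rewrite | github.com/christianebacani/Roadmap | Coding Challenges using Python and SQL/Code Wars Python Solved Problems/6 Kyu/data_reverse.py | data_reverse
-- ===== SOURCE A (Python) =====
-- def data_reverse(data: list[int]) -> list[int]:
--     list_of_bytes = []
--
--     for i in range(0, len(data), 8):
--         byte = data[i : i + 8]
--         list_of_bytes.append(byte)
--
--     # Reverse the bytes
--     list_of_bytes = list_of_bytes[::-1]
--     result = []
--
--     for i in range(len(list_of_bytes)):
--         for j in range(len(list_of_bytes[i])):
--             result.append(list_of_bytes[i][j])
--
--     return result
-- ===== SOURCE B (Python) =====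
-- def data_reverse(data: list[int]) -> list[int]:
--     if not data:
--         return []
--     result = []
--     i = (len(data) - 1) // 8 * 8
--     while i >= 0:
--         result.extend(data[i:i + 8])
--         i -= 8
--     return result
-- ===== Notes on version B (the rewrite author's own statement) =====
-- stated objective: alternative
-- what changed: B emits the groups directly in one descending index walk (start at the last 8-aligned offset, extend with data[i:i+8], step i by -8), instead of A's three phases: build a list of chunks, reverse that list, then flatten it with nested index loops.
import Mathlib
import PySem

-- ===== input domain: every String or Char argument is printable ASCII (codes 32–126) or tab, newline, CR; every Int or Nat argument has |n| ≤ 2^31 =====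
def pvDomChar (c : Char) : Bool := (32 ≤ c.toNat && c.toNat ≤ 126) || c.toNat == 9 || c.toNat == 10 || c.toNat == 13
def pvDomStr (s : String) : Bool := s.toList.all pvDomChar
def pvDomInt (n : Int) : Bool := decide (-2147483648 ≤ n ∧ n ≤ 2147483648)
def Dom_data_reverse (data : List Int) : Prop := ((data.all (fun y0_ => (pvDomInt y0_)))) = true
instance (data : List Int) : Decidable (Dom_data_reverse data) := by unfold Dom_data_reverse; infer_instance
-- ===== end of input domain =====

-- B replaces A's build-chunks / reverse-list / nested-flatten phases by a single
-- descending index walk emitting each 8-group directly (alternative decomposition, same O(n) cost).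


-- ===== PORT A =====
def data_reverse (data : List Int) : List Int :=
  -- list_of_bytes = []; for i in range(0, len(data), 8): list_of_bytes.append(data[i:i+8])
  let list_of_bytes : List (List Int) :=
    (PySem.List.pyRange 0 (PySem.List.len data) 8).foldl
      (fun acc i => acc ++ [PySem.List.slice data (some i) (some (i + 8))]) []
  -- list_of_bytes = list_of_bytes[::-1]   (step -1 slice; never None for step ≠ 0)
  let list_of_bytes := (PySem.List.slice? list_of_bytes none none (-1)).getD []
  -- result = []; for i in range(len(list_of_bytes)): for j in range(len(..[i])): result.append(..[i][j])
  (PySem.List.pyRange 0 (PySem.List.len list_of_bytes)).foldl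
    (fun res i =>
      let byte := PySem.List.pyGetD list_of_bytes i []
      (PySem.List.pyRange 0 (PySem.List.len byte)).foldl
        (fun res j => res ++ [PySem.List.pyGetD byte j 0]) res)
    []

-- ===== PORT B =====
-- while i >= 0: result.extend(data[i:i+8]); i -= 8   (i stays a multiple of 8, so the
-- loop exits exactly when i = 0 handed i-8 < 0; modelled on Nat by stopping when i < 8)
def data_reverse_altLoop (data : List Int) (i : Nat) (result : List Int) : List Int :=
  let result' := result ++ (data.drop i).take 8      -- result.extend(data[i:i+8]), i ≥ 0
  if i < 8 then result' else data_reverse_altLoop data (i - 8) result'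
termination_by i
decreasing_by omega

def data_reverse_alt (data : List Int) : List Int :=
  if data.length = 0 then []
  else data_reverse_altLoop data ((data.length - 1) / 8 * 8) []

-- ===== PRECONDITION & SPEC =====
def Spec_data_reverse (data : List Int) (out : List Int) : Prop := out = data_reverse_alt data
instance (data : List Int) (out : List Int) : Decidable (Spec_data_reverse data out) := by unfold Spec_data_reverse; infer_instance

-- ===== CLAIM (what is proved, stated in full; the proofs are below) =====
def Claim_equal_data_reverse : Prop := ∀ (data : List Int), Dom_data_reverse data → Spec_data_reverse data (data_reverse data)

-- ===== LEMMAS AND PROOFS =====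

-- A's chunk list, in canonical form
def pvChunk (data : List Int) (k : Nat) : List Int := (data.drop (8 * k)).take 8

lemma data_reverse_eq_chunks (data : List Int) (h : data ≠ []) :
    data_reverse data =
      (((List.range ((data.length + 7) / 8)).map (pvChunk data)).reverse).flatten := by
  simp only [data_reverse]
  rw [PySem.List.foldl_append_singleton_eq_map, PySem.List.slice?_none_none_neg_one]
  simp only [Option.getD_some]
  rw [PySem.List.foldl_pyRange_zero_pyGetD (f := fun res byte =>
        (PySem.List.pyRange 0 (PySem.List.len byte)).foldl
          (fun res j => res ++ [PySem.List.pyGetD byte j 0]) res)]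
  have hinner : ∀ (init : List Int) (byte : List Int),
      (PySem.List.pyRange 0 (PySem.List.len byte)).foldl
        (fun res j => res ++ [PySem.List.pyGetD byte j 0]) init = init ++ byte := by
    intro init byte
    rw [PySem.List.foldl_pyRange_zero_pyGetD (f := fun res x => res ++ [x])]
    exact PySem.List.foldl_append_singleton byte init
  have hfold : ∀ (l : List (List Int)) (init : List Int),
      l.foldl (fun res byte =>
        (PySem.List.pyRange 0 (PySem.List.len byte)).foldl
          (fun res j => res ++ [PySem.List.pyGetD byte j 0]) res) init = init ++ l.flatten := by
    intro l
    induction l with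
    | nil => simp
    | cons b t ih =>
      intro init
      simp only [List.foldl_cons]
      rw [hinner init b, ih, List.flatten_cons, List.append_assoc]
  rw [hfold]
  simp only [List.nil_append]
  congr 1
  congr 1
  -- the chunk list itself
  rw [PySem.List.pyRange_of_pos 0 (PySem.List.len data) (by norm_num)]
  have hlen : PySem.List.len data = (data.length : Int) := by simp [PySem.List.len]
  have hpos : (0 : Int) < PySem.List.len data := by
    rw [hlen]; exact_mod_cast List.length_pos_iff.mpr h
  rw [if_pos hpos, List.map_map]
  have hcount : ((PySem.List.len data - 0 + 8 - 1) / 8).toNat = (data.length + 7) / 8 := by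
    rw [hlen]; omega
  rw [hcount]
  apply List.map_congr_left
  intro k _
  show PySem.List.slice data (some (0 + 8 * (k : Int))) (some (0 + 8 * (k : Int) + 8)) = pvChunk data k
  rw [show (0 + 8 * (k : Int)) = ((8 * k : Nat) : Int) by push_cast; ring,
      show ((8 : Int)) = ((8 : Nat) : Int) from rfl,
      PySem.List.slice_natCast_add]
  rfl

lemma data_reverse_nil : data_reverse [] = [] := by rfl

-- A's one-chunk-off recurrence
lemma data_reverse_rec (data : List Int) (h : data ≠ []) :
    data_reverse data = data_reverse (data.drop 8) ++ data.take 8 := by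
  rw [data_reverse_eq_chunks data h]
  by_cases hle : data.length ≤ 8
  · have hdrop : data.drop 8 = [] := by
      apply List.drop_eq_nil_of_le; exact hle
    have hn : (data.length + 7) / 8 = 1 := by
      have : 0 < data.length := List.length_pos_iff.mpr h
      omega
    rw [hn, hdrop, data_reverse_nil]
    simp [pvChunk, List.take_of_length_le hle]
  · have hdropne : data.drop 8 ≠ [] := by
      intro hc
      have := List.drop_eq_nil_iff.mp hc
      omega
    rw [data_reverse_eq_chunks _ hdropne]
    have hn : (data.length + 7) / 8 = ((data.drop 8).length + 7) / 8 + 1 := by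
      simp only [List.length_drop]; omega
    rw [hn, List.range_succ_eq_map, List.map_cons, List.reverse_cons, List.flatten_append,
        List.map_map]
    have hchunk : ∀ k, pvChunk data (Nat.succ k) = pvChunk (data.drop 8) k := by
      intro k
      simp only [pvChunk, List.drop_drop]
      congr 2
      omega
    have : (List.map (pvChunk data ∘ Nat.succ) (List.range (((data.drop 8).length + 7) / 8)))
         = List.map (pvChunk (data.drop 8)) (List.range (((data.drop 8).length + 7) / 8)) := by
      apply List.map_congr_left; intro k _; exact hchunk k
    rw [this]
    simp [pvChunk]

lemma altLoop_lt (data : List Int) (i : Nat) (res : List Int) (h : i < 8) :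
    data_reverse_altLoop data i res = res ++ (data.drop i).take 8 := by
  rw [data_reverse_altLoop, if_pos h]

lemma altLoop_ge (data : List Int) (i : Nat) (res : List Int) (h : ¬ i < 8) :
    data_reverse_altLoop data i res
      = data_reverse_altLoop data (i - 8) (res ++ (data.drop i).take 8) := by
  rw [data_reverse_altLoop, if_neg h]

-- B's loop shifted down one chunk
lemma altLoop_shift (data : List Int) :
    ∀ (k : Nat) (res : List Int),
      data_reverse_altLoop data (8 * k + 8) res
        = data_reverse_altLoop (data.drop 8) (8 * k) res ++ data.take 8 := by
  intro k
  induction k with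
  | zero =>
    intro res
    rw [show 8 * 0 + 8 = 8 by norm_num, show 8 * 0 = 0 by norm_num,
        altLoop_ge data 8 res (by omega), show (8 : Nat) - 8 = 0 from rfl,
        altLoop_lt data 0 _ (by omega), altLoop_lt (data.drop 8) 0 res (by omega)]
    simp
  | succ k ih =>
    intro res
    rw [altLoop_ge data (8 * (k + 1) + 8) res (by omega),
        show 8 * (k + 1) + 8 - 8 = 8 * k + 8 by omega, ih,
        altLoop_ge (data.drop 8) (8 * (k + 1)) res (by omega),
        show 8 * (k + 1) - 8 = 8 * k by omega]
    have h3 : (List.drop 8 data).drop (8 * (k + 1)) = List.drop (8 * (k + 1) + 8) data := by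
      rw [List.drop_drop]
      congr 1
      omega
    rw [h3]

-- B's one-chunk-off recurrence
lemma data_reverse_alt_rec (data : List Int) (h : data ≠ []) :
    data_reverse_alt data = data_reverse_alt (data.drop 8) ++ data.take 8 := by
  have hpos : 0 < data.length := List.length_pos_iff.mpr h
  unfold data_reverse_alt
  rw [if_neg (by omega)]
  by_cases hle : data.length ≤ 8
  · have hs : (data.length - 1) / 8 * 8 = 0 := by omega
    have hdrop : data.drop 8 = [] := List.drop_eq_nil_of_le hle
    rw [hs, hdrop, data_reverse_altLoop]
    simp
  · have hdlen : (data.drop 8).length = data.length - 8 := by simp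
    rw [if_neg (by omega)]
    have hs : (data.length - 1) / 8 * 8 = 8 * ((data.length - 9) / 8) + 8 := by omega
    rw [hs, altLoop_shift]
    congr 2
    · omega
lemma data_reverse_agree : ∀ (n : Nat) (data : List Int), data.length ≤ n →
    data_reverse data = data_reverse_alt data := by
  intro n
  induction n with
  | zero =>
    intro data hlen
    have : data = [] := List.eq_nil_of_length_eq_zero (by omega)
    subst this; rfl
  | succ n ih =>
    intro data hlen
    by_cases h : data = []
    · subst h; rfl
    · rw [data_reverse_rec data h, data_reverse_alt_rec data h,
          ih (data.drop 8) (by simp; omega)]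

-- ===== VERDICT (by name: the statement is the Claim_ definition above) =====
theorem data_reverse_spec : Claim_equal_data_reverse := by
  intro data _
  unfold Spec_data_reverse
  exact data_reverse_agree data.length data le_rfl
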